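-- pv_equiv track=rewrite | github.com/karzmei/standard-algorithms-ex | mashroom_picker.py | mushroom_strategy
-- ===== SOURCE A (Python) =====
-- def mushroom_strategy(mushrooms, start, steps):
--     """ given an array mushrooms of non-negatives which tells us how many mushrooms are in each spot
--     and a starting position start, need to find best strategy to collect as many as possible given a limited number of steps.
--     Cannot collect twice from the same spot (ie after one time the mushrooms there are zero but can still pass this spot).
--     Each step is one step left or right.
--     Returns the total max sum of collected mushrooms under the constrains and the amount of effective steps to the right."""
--
--     # create prefix sums array:
--     length = len(mushrooms)
--     prefix_sums = []
--     for i in range(length):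
--         if i == 0:
--             prefix_sums.append(mushrooms[i])
--         else:
--             prefix_sums.append(prefix_sums[i-1] + mushrooms[i])
--
--     # find the best route:
--     max_sum = 0
--     steps_to_right = 0
--     for to_right in range(0, min(steps, length-1 - start) +1):
--         right = start + to_right
--         left = start - (steps - 2*to_right)
--         if left <= 0:
--             result_sum = prefix_sums[right]
--         else:
--             result_sum = prefix_sums[right] - prefix_sums[left-1]
--         if result_sum > max_sum:
--             max_sum = result_sum
--             steps_to_right = to_right
--
--     return max_sum, steps_to_right
-- ===== SOURCE B (Python) =====
-- def mushroom_strategy(mushrooms, start, steps):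
--     """Same result as A, but without the prefix-sum table: each candidate
--     window [lb, right] is summed directly from a slice of mushrooms."""
--     length = len(mushrooms)
--     max_sum = 0
--     steps_to_right = 0
--     for to_right in range(0, min(steps, length - 1 - start) + 1):
--         right = start + to_right
--         left = start - (steps - 2 * to_right)
--         lb = left if left > 0 else 0
--         result_sum = sum(mushrooms[lb:right + 1])
--         if result_sum > max_sum:
--             max_sum = result_sum
--             steps_to_right = to_right
--     return max_sum, steps_to_right
-- ===== Notes on version B (the rewrite author's own statement) =====
-- stated objective: simpler
-- what changed: B drops A's prefix-sum table entirely and computes each candidate window's total by summing the slice mushrooms[lb:right+1] directly inside the single loop over to_right.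
-- outside the precondition, e.g. on mushroom_strategy([1, 2, 3], -1, 0): A returns (6, 0), B returns (0, 0); on mushroom_strategy([], -1, 0): A raises IndexError, B returns (0, 0)
import Mathlib
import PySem

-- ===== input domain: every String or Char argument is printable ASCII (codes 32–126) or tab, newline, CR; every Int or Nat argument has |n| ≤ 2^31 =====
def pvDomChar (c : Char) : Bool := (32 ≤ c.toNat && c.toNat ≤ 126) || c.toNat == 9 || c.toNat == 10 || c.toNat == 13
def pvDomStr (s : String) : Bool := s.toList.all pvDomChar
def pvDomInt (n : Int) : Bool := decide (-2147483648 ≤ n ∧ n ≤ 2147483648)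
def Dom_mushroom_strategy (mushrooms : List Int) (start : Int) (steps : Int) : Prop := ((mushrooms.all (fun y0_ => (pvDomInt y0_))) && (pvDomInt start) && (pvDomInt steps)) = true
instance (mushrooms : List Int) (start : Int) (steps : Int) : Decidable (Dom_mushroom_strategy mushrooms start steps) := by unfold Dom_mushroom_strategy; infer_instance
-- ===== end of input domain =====

-- B drops A's prefix-sum table and sums each candidate window directly from a slice (objective: simpler).
-- Pre_ excludes negative start with nonnegative steps: the starting position is outside the array's
-- natural domain there, and A reads its prefix table through Python negative-index wraparound
-- (or raises IndexError), a corner no caller would specify; B just sums clamped slices there.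


-- ===== PORT A =====
def mushroom_strategy (mushrooms : List Int) (start : Int) (steps : Int) : Int × Int :=
  let length : Int := mushrooms.length
  -- prefix-sum table loop: for i in range(length)
  let prefix_sums : List Int :=
    (PySem.List.pyRange 0 length 1).foldl
      (fun ps i =>
        if i == 0 then ps ++ [PySem.List.pyGetD mushrooms i 0]
        else ps ++ [PySem.List.pyGetD ps (i - 1) 0 + PySem.List.pyGetD mushrooms i 0]) []
  -- search loop: for to_right in range(0, min(steps, length-1-start)+1)
  let r : Int × Int :=
    (PySem.List.pyRange 0 (min steps (length - 1 - start) + 1) 1).foldl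
      (fun (st : Int × Int) to_right =>
        let right := start + to_right
        let left := start - (steps - 2 * to_right)
        let result_sum :=
          if left ≤ 0 then PySem.List.pyGetD prefix_sums right 0
          else PySem.List.pyGetD prefix_sums right 0 - PySem.List.pyGetD prefix_sums (left - 1) 0
        if result_sum > st.1 then (result_sum, to_right) else st) (0, 0)
  r

-- ===== PORT B =====
def mushroom_strategy_alt (mushrooms : List Int) (start : Int) (steps : Int) : Int × Int :=
  let length : Int := mushrooms.length
  (PySem.List.pyRange 0 (min steps (length - 1 - start) + 1) 1).foldl
    (fun (st : Int × Int) to_right =>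
      let right := start + to_right
      let left := start - (steps - 2 * to_right)
      let lb := if left > 0 then left else 0
      let result_sum := (PySem.List.slice mushrooms (some lb) (some (right + 1))).sum
      if result_sum > st.1 then (result_sum, to_right) else st) (0, 0)

-- ===== PRECONDITION & SPEC =====
-- Pre_ excludes negative start with nonnegative steps: there A indexes its prefix table with
-- negative Python indices (wraparound, or IndexError when start < -len), outside the natural domain.
def Pre_mushroom_strategy (mushrooms : List Int) (start : Int) (steps : Int) : Prop :=
  0 ≤ start ∨ steps < 0
instance (mushrooms : List Int) (start : Int) (steps : Int) : Decidable (Pre_mushroom_strategy mushrooms start steps) := by unfold Pre_mushroom_strategy; infer_instance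

def pvWitness_mushroom_strategy : List Int × Int × Int := ([3, 1, 4, 1, 5], 2, 3)

def Spec_mushroom_strategy (mushrooms : List Int) (start : Int) (steps : Int) (out : Int × Int) : Prop := out = mushroom_strategy_alt mushrooms start steps
instance (mushrooms : List Int) (start : Int) (steps : Int) (out : Int × Int) : Decidable (Spec_mushroom_strategy mushrooms start steps out) := by unfold Spec_mushroom_strategy; infer_instance

-- ===== CLAIM (what is proved, stated in full; the proofs are below) =====
def Claim_equal_mushroom_strategy : Prop := ∀ (mushrooms : List Int) (start : Int) (steps : Int), Dom_mushroom_strategy mushrooms start steps → Pre_mushroom_strategy mushrooms start steps → Spec_mushroom_strategy mushrooms start steps (mushroom_strategy mushrooms start steps)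

-- ===== LEMMAS AND PROOFS =====

-- A's prefix-sum table is pointwise the sums of the prefixes of mushrooms.
theorem prefix_fold_eq (ms : List Int) (n : Nat) (hn : n ≤ ms.length) :
    List.foldl
      (fun ps i =>
        if i == 0 then ps ++ [PySem.List.pyGetD ms i 0]
        else ps ++ [PySem.List.pyGetD ps (i - 1) 0 + PySem.List.pyGetD ms i 0]) []
      ((List.range n).map (fun k : Nat => ((0 : Int) + (k : Int))))
    = (List.range n).map (fun k => (ms.take (k + 1)).sum) := by
  induction n with
  | zero => simp
  | succ m ih =>
    have hm : m ≤ ms.length := by omega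
    rw [List.range_succ, List.map_append, List.map_append, List.foldl_append, ih hm]
    by_cases hm0 : m = 0
    · subst hm0
      have hlen : 0 < ms.length := by omega
      cases ms with
      | nil => simp at hlen
      | cons a t => simp [PySem.List.pyGetD_zero_cons]
    · have hif : (((0 : Int) + (m : Int)) == 0) = false := by
        simp [hm0]
      simp only [List.map_cons, List.map_nil, List.foldl_cons, List.foldl_nil, hif,
        Bool.false_eq_true, if_false]
      have hmlt : m < ms.length := by omega
      have h1 : PySem.List.pyGetD ((List.range m).map (fun k => (ms.take (k + 1)).sum))
          ((0 : Int) + (m : Int) - 1) 0 = (ms.take m).sum := by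
        rw [PySem.List.pyGetD_eq_getElem _ _ (by omega)
          (by simp only [List.length_map, List.length_range]; omega)]
        rw [List.getElem_map, List.getElem_range,
          show (((0 : Int) + (m : Int) - 1)).toNat + 1 = m by omega]
      have h2 : PySem.List.pyGetD ms ((0 : Int) + (m : Int)) 0 = ms[m] := by
        rw [PySem.List.pyGetD_eq_getElem _ _ (by omega) (by omega)]
        congr 1
        omega
      rw [h1, h2, List.sum_take_succ ms m hmlt]

-- the two loop bodies compute the same window sum on every to_right of the search range
theorem window_sum_eq (ms : List Int) (start steps to_right : Int)
    (hs : 0 ≤ start) (ht0 : 0 ≤ to_right)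
    (ht : to_right ≤ min steps ((ms.length : Int) - 1 - start)) :
    (if start - (steps - 2 * to_right) ≤ 0 then
        PySem.List.pyGetD ((List.range ms.length).map (fun k => (ms.take (k + 1)).sum))
          (start + to_right) 0
      else
        PySem.List.pyGetD ((List.range ms.length).map (fun k => (ms.take (k + 1)).sum))
          (start + to_right) 0 -
        PySem.List.pyGetD ((List.range ms.length).map (fun k => (ms.take (k + 1)).sum))
          (start - (steps - 2 * to_right) - 1) 0)
    = (PySem.List.slice ms
        (some (if start - (steps - 2 * to_right) > 0 then start - (steps - 2 * to_right) else 0))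
        (some (start + to_right + 1))).sum := by
  have hts : to_right ≤ steps := le_trans ht (min_le_left _ _)
  have htl : to_right ≤ (ms.length : Int) - 1 - start := le_trans ht (min_le_right _ _)
  have hrlt : start + to_right < (ms.length : Int) := by omega
  have hP : PySem.List.pyGetD ((List.range ms.length).map (fun k => (ms.take (k + 1)).sum))
      (start + to_right) 0 = (ms.take ((start + to_right).toNat + 1)).sum := by
    rw [PySem.List.pyGetD_eq_getElem _ _ (by omega) (by simp; omega)]
    rw [List.getElem_map, List.getElem_range]
  set left := start - (steps - 2 * to_right) with hleftdef
  have hlr : left ≤ start + to_right := by omega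
  by_cases hl : left ≤ 0
  · rw [if_pos hl, if_neg (by omega), hP]
    rw [PySem.List.slice_zero_start, PySem.List.slice_to _ (by omega)]
    rw [show (start + to_right + 1).toNat = (start + to_right).toNat + 1 by omega]
  · rw [if_neg hl, if_pos (by omega), hP]
    have hQ : PySem.List.pyGetD ((List.range ms.length).map (fun k => (ms.take (k + 1)).sum))
        (left - 1) 0 = (ms.take left.toNat).sum := by
      rw [PySem.List.pyGetD_eq_getElem _ _ (by omega) (by simp; omega)]
      rw [List.getElem_map, List.getElem_range,
        show (left - 1).toNat + 1 = left.toNat by omega]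
    rw [hQ, PySem.List.slice_toNat ms (by omega) (by omega)]
    have hsplit : ms.take ((start + to_right + 1).toNat) =
        ms.take left.toNat ++
          (ms.drop left.toNat).take ((start + to_right + 1).toNat - left.toNat) := by
      rw [← List.take_add]
      congr 1
      omega
    have hsum : (ms.take ((start + to_right).toNat + 1)).sum =
        (ms.take left.toNat).sum +
        ((ms.drop left.toNat).take ((start + to_right + 1).toNat - left.toNat)).sum := by
      have : (start + to_right).toNat + 1 = (start + to_right + 1).toNat := by omega
      rw [this, hsplit, List.sum_append]
    omega

-- ===== VERDICT (by name: the statement is the Claim_ definition above) =====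
theorem mushroom_strategy_spec : Claim_equal_mushroom_strategy := by
  intro mushrooms start steps _hdom hpre
  unfold Spec_mushroom_strategy mushroom_strategy mushroom_strategy_alt
  dsimp only
  rcases hpre with hs | hneg
  · -- 0 ≤ start : both loops run over the same range with pointwise-equal bodies
    apply PySem.List.foldl_congr_mem
    intro acc x hx
    rw [PySem.List.mem_pyRange_one] at hx
    rw [PySem.List.pyRange_one 0 (mushrooms.length : Int),
      show ((mushrooms.length : Int) - 0).toNat = mushrooms.length by omega,
      prefix_fold_eq mushrooms mushrooms.length (le_refl _)]
    rw [window_sum_eq mushrooms start steps x hs hx.1 (by omega)]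
  · -- steps < 0 : the search range is empty in both programs
    rw [PySem.List.pyRange_one_eq_nil
      (a := 0) (b := min steps ((mushrooms.length : Int) - 1 - start) + 1) (by omega)]
    rfl
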